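-- pv_equiv track=rewrite | github.com/YANGSEOKWOO/Algorithm | Programmers/Level0/최빈값 구하기.py | solution
-- ===== SOURCE A (Python) =====
-- def solution(array):
--     anw = []
--     n = len(array)
--     map = [0]*(1001)
--     for i in range(n):
--         map[array[i]] += 1
--     max_cnt = max(map)
--     for i in range(1001):
--         if map[i] == max_cnt:
--             anw.append(i)
--     if len(anw) == 1:
--         return anw[0]
--     return -1
-- ===== SOURCE B (Python) =====
-- def solution(array):
--     tbl = [0] * 1001
--     for v in array:
--         tbl[v] += 1
--     order = sorted(zip(tbl, range(1001)), key=lambda p: p[0], reverse=True)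
--     (c1, i1), (c2, i2) = order[0], order[1]
--     return i1 if c1 > c2 else -1
-- ===== Notes on version B (the rewrite author's own statement) =====
-- stated objective: alternative
-- what changed: A's two post-count passes (max over the table, then a full scan collecting all argmax indices into a list) are replaced by a stable descending sort of (count, index) pairs: the answer is the first pair's index unless the second pair carries the same count.
import Mathlib
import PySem

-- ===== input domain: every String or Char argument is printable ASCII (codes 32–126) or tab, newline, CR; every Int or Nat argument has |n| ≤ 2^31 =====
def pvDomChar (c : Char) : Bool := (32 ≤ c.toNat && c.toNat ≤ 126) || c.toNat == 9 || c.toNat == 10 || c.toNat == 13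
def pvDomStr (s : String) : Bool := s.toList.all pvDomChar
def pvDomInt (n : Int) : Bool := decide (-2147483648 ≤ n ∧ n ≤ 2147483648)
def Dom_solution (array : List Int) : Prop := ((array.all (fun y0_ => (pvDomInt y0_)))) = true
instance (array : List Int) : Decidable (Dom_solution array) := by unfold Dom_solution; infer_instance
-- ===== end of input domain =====

-- B replaces A's two post-count passes (max over the table, then a scan collecting all
-- argmax indices into a list) by a stable descending sort of (count, index) pairs:
-- the answer is the first pair's index unless the second pair carries the same count ('alternative').

-- ===== PORT A =====
def solution (array : List Int) : Int :=
  let n : Int := (array.length : Int)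
  let map0 : List Int := List.replicate 1001 0
  let map := (PySem.List.pyRange 0 n 1).foldl
      (fun m i => PySem.List.pySetD m (PySem.List.pyGetD array i 0)
                    (PySem.List.pyGetD m (PySem.List.pyGetD array i 0) 0 + 1)) map0
  let max_cnt := (PySem.List.max? map (fun x => x)).getD 0
  let anw := (PySem.List.pyRange 0 1001 1).foldl
      (fun acc i => if PySem.List.pyGetD map i 0 = max_cnt then acc ++ [i] else acc) ([] : List Int)
  if anw.length = 1 then PySem.List.pyGetD anw 0 0 else -1

-- ===== PORT B =====
def solution_alt (array : List Int) : Int :=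
  let tbl : List Int := array.foldl
      (fun c v => PySem.List.pySetD c v (PySem.List.pyGetD c v 0 + 1)) (List.replicate 1001 0)
  let order := PySem.List.sorted (tbl.zip (PySem.List.pyRange 0 1001 1))
      (fun p => p.1) true
  let p1 := PySem.List.pyGetD order 0 (0, 0)
  let p2 := PySem.List.pyGetD order 1 (0, 0)
  if p2.1 < p1.1 then p1.2 else -1

-- ===== PRECONDITION & SPEC =====
-- Pre_ excludes exactly the inputs on which Python A raises IndexError:
-- an element v with v > 1000 or v < -1001 is out of range for the 1001-slot table.
def Pre_solution (array : List Int) : Prop := ∀ v ∈ array, -1001 ≤ v ∧ v ≤ 1000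
instance (array : List Int) : Decidable (Pre_solution array) := by unfold Pre_solution; infer_instance
def pvWitness_solution : List Int := [1, 2, 2]

def Spec_solution (array : List Int) (out : Int) : Prop := out = solution_alt array
instance (array : List Int) (out : Int) : Decidable (Spec_solution array out) := by unfold Spec_solution; infer_instance

-- ===== CLAIM (what is proved, stated in full; the proofs are below) =====
def Claim_equal_solution : Prop := ∀ (array : List Int), Dom_solution array → Pre_solution array → Spec_solution array (solution array)

-- ===== LEMMAS AND PROOFS =====

-- counting step shared by both ports' counting loops (proof-side abbreviation)
def cstep (c : List Int) (v : Int) : List Int :=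
  PySem.List.pySetD c v (PySem.List.pyGetD c v 0 + 1)

def cnt (array : List Int) : List Int := array.foldl cstep (List.replicate 1001 0)

-- running max with initial -1
def mxv (m : List Int) : Int := m.foldl max (-1)

lemma pyGetD_mem_or (xs : List Int) (i d : Int) :
    PySem.List.pyGetD xs i d ∈ xs ∨ PySem.List.pyGetD xs i d = d := by
  unfold PySem.List.pyGetD
  cases h : PySem.List.pyGet? xs i with
  | none => simp
  | some a => exact Or.inl (by simpa using PySem.List.mem_of_pyGet?_eq_some (xs := xs) (i := i) h)

lemma mem_pySetD {m : List Int} {i v x : Int}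
    (h : x ∈ PySem.List.pySetD m i v) : x ∈ m ∨ x = v := by
  unfold PySem.List.pySetD PySem.List.pySet? at h
  cases hk : PySem.List.pyIdx? m.length i with
  | none => simp [hk] at h; exact Or.inl h
  | some k => simp [hk] at h; exact List.mem_or_eq_of_mem_set h

lemma length_cnt_foldl (array : List Int) (init : List Int) :
    (array.foldl cstep init).length = init.length := by
  induction array generalizing init with
  | nil => rfl
  | cons a t ih =>
      simp only [List.foldl_cons, ih, cstep, PySem.List.length_pySetD]

lemma nonneg_cnt_foldl (array : List Int) (init : List Int)
    (h : ∀ x ∈ init, 0 ≤ x) : ∀ x ∈ array.foldl cstep init, 0 ≤ x := by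
  induction array generalizing init with
  | nil => exact h
  | cons a t ih =>
      refine ih _ (fun x hx => ?_)
      rcases mem_pySetD hx with hm | he
      · exact h x hm
      · have := pyGetD_mem_or init a 0
        subst he
        rcases this with hm | hd
        · exact le_trans (h _ hm) (by omega)
        · omega

lemma le_mxv (m : List Int) : ∀ y ∈ m, y ≤ mxv m := (PySem.List.le_foldl_max m (-1)).2

lemma mxv_mem (m : List Int) (hm : m ≠ []) (h0 : ∀ x ∈ m, 0 ≤ x) : mxv m ∈ m := by
  rcases PySem.List.foldl_max_mem m (-1) with h | h
  · exfalso
    obtain ⟨y, hy⟩ := List.exists_mem_of_ne_nil m hm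
    have h1 := le_mxv m y hy
    have h2 := h0 y hy
    unfold mxv at h1
    omega
  · exact h

lemma max_cnt_eq (m : List Int) (hm : m ≠ []) (h0 : ∀ x ∈ m, 0 ≤ x) :
    (PySem.List.max? m (fun x => x)).getD 0 = mxv m := by
  cases m with
  | nil => exact absurd rfl hm
  | cons h t =>
      rw [PySem.List.max?_id_cons]
      have hh : 0 ≤ h := h0 h (by simp)
      simp only [Option.getD_some, mxv, List.foldl_cons]
      rw [show max (-1 : Int) h = h by omega]

lemma anw_eq (m : List Int) (hlen : m.length = 1001) (M : Int) :
    (PySem.List.pyRange 0 1001 1).foldl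
        (fun acc i => if PySem.List.pyGetD m i 0 = M then acc ++ [i] else acc)
        ([] : List Int)
      = List.map (fun k : Nat => (k : Int))
          ((List.range m.length).filter (fun k => decide (m.getD k 0 = M))) := by
  rw [PySem.List.foldl_append_ite_eq_filter (p := fun i => PySem.List.pyGetD m i 0 = M)]
  rw [show (1001 : Int) = ((1001 : Nat) : Int) by norm_num, PySem.List.pyRange_zero_natCast]
  rw [List.filter_map, hlen]
  have hpred : ((fun i => decide (PySem.List.pyGetD m i 0 = M)) ∘ (fun k : Nat => (k : Int)))
      = fun k : Nat => decide (m.getD k 0 = M) := by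
    funext k
    simp [Function.comp, PySem.List.pyGetD_natCast]
  rw [List.nil_append, hpred]

-- two distinct members force length ≥ 2
lemma two_le_length_of_ne {α : Type} {l : List α} {x y : α}
    (hx : x ∈ l) (hy : y ∈ l) (hne : x ≠ y) : 2 ≤ l.length := by
  rcases l with _ | ⟨z, _ | ⟨w, t⟩⟩
  · cases hx
  · simp only [List.mem_singleton] at hx hy
    exact absurd (hx.trans hy.symm) hne
  · simp only [List.length_cons]
    omega

-- core equality: A's max-then-collect post-processing equals B's sorted-top-two
-- post-processing over any 1001-entry nonnegative table m
set_option maxRecDepth 8192 in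
lemma post_eq (m : List Int) (hlen : m.length = 1001) (hnn : ∀ x ∈ m, 0 ≤ x) :
    (if ((PySem.List.pyRange 0 1001 1).foldl
          (fun acc i => if PySem.List.pyGetD m i 0 = (PySem.List.max? m (fun x => x)).getD 0
            then acc ++ [i] else acc) ([] : List Int)).length = 1
      then PySem.List.pyGetD ((PySem.List.pyRange 0 1001 1).foldl
          (fun acc i => if PySem.List.pyGetD m i 0 = (PySem.List.max? m (fun x => x)).getD 0
            then acc ++ [i] else acc) ([] : List Int)) 0 0
      else -1)
    = (if (PySem.List.pyGetD (PySem.List.sorted (m.zip (PySem.List.pyRange 0 1001 1))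
              (fun p => p.1) true) 1 ((0 : Int), (0 : Int))).1 <
          (PySem.List.pyGetD (PySem.List.sorted (m.zip (PySem.List.pyRange 0 1001 1))
              (fun p => p.1) true) 0 ((0 : Int), (0 : Int))).1
        then (PySem.List.pyGetD (PySem.List.sorted (m.zip (PySem.List.pyRange 0 1001 1))
              (fun p => p.1) true) 0 ((0 : Int), (0 : Int))).2
        else -1) := by
  have hne : m ≠ [] := by
    intro h; rw [h] at hlen; simp at hlen
  set R := PySem.List.pyRange 0 1001 1 with hRdef
  have hR : R = (List.range 1001).map (fun k : Nat => (k : Int)) := by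
    rw [hRdef, show (1001 : Int) = ((1001 : Nat) : Int) by norm_num,
      PySem.List.pyRange_zero_natCast]
  have hRlen : R.length = 1001 := by rw [hR]; simp
  have hRnodup : R.Nodup := by
    rw [hR]
    exact (List.nodup_range).map (fun a b h => by exact_mod_cast h)
  set P := m.zip R with hPdef
  have hPlen : P.length = 1001 := by
    rw [hPdef, List.length_zip, hlen, hRlen]
    omega
  have hPeq : P = (List.range 1001).map (fun k : Nat => (m.getD k 0, (k : Int))) := by
    apply List.ext_getElem
    · rw [hPlen, List.length_map, List.length_range]
    · intro i h1 h2
      rw [hPlen] at h1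
      have him : i < m.length := by omega
      have hiR : i < R.length := by omega
      simp only [List.getElem_map, List.getElem_range, hPdef, List.getElem_zip]
      rw [Prod.mk.injEq]
      constructor
      · rw [List.getD_eq_getElem m 0 him]
      · have : R[i]'hiR = ((List.range 1001).map (fun j : Nat => (j : Int)))[i]'(by rw [List.length_map, List.length_range]; exact h1) := by
          congr 1 <;> rw [hR]
        rw [this, List.getElem_map, List.getElem_range]
  have hPmem : ∀ p ∈ P, ∃ j : Nat, j < 1001 ∧ p = (m.getD j 0, (j : Int)) := by
    intro p hp
    rw [hPeq] at hp
    obtain ⟨j, hj, rfl⟩ := List.mem_map.mp hp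
    exact ⟨j, List.mem_range.mp hj, rfl⟩
  have hPmem' : ∀ j : Nat, j < 1001 → (m.getD j 0, (j : Int)) ∈ P := by
    intro j hj
    rw [hPeq]
    exact List.mem_map.mpr ⟨j, List.mem_range.mpr hj, rfl⟩
  have hPnodup : P.Nodup := by
    rw [hPeq]
    refine (List.nodup_range).map ?_
    intro a b h
    have := congrArg Prod.snd h
    simp only [] at this
    exact_mod_cast this
  set o := PySem.List.sorted P (fun p : Int × Int => p.1) true with hodef
  have operm : o.Perm P := PySem.List.sorted_perm P (fun p : Int × Int => p.1) true
  have olen : o.length = 1001 := by rw [operm.length_eq, hPlen]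
  have onodup : o.Nodup := operm.nodup_iff.mpr hPnodup
  set M := mxv m with hM
  rcases ho : o with _ | ⟨p1, _ | ⟨p2, t⟩⟩
  · rw [ho] at olen; simp at olen
  · rw [ho] at olen; simp at olen
  have hp1P : p1 ∈ P := operm.mem_iff.mp (by rw [ho]; simp)
  have hp2P : p2 ∈ P := operm.mem_iff.mp (by rw [ho]; simp)
  have hp12 : p1 ≠ p2 := by
    have hnd := onodup
    rw [ho, List.nodup_cons] at hnd
    exact fun h => hnd.1 (by rw [h]; simp)
  obtain ⟨j1, hj1_lt, hj1⟩ := hPmem p1 hp1P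
  obtain ⟨j2, hj2_lt, hj2⟩ := hPmem p2 hp2P
  -- the head of the descending sort carries the maximal count
  have hka : p1.1 = M := by
    have hle : p1.1 ≤ M := by
      refine le_mxv m _ ?_
      rw [hj1]
      rw [List.getD_eq_getElem m 0 (by omega)]
      exact List.getElem_mem _
    have hge : M ≤ p1.1 := by
      obtain ⟨j, hj, hjv⟩ := List.mem_iff_getElem.mp (mxv_mem m hne hnn)
      have hjP : (m.getD j 0, (j : Int)) ∈ P := hPmem' j (by omega)
      have hh := PySem.List.key_head_sorted_rev_ge P
        (fun p : Int × Int => p.1) (hodef.symm.trans ho) _ hjP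
      simp only [] at hh
      have hgd : m.getD j 0 = M := by
        rw [List.getD_eq_getElem m 0 (by omega), hjv]
      rwa [hgd] at hh
    omega
  have hpw := PySem.List.sorted_pairwise_rev P (fun p : Int × Int => p.1)
  rw [← hodef, ho] at hpw
  rcases List.pairwise_cons.mp hpw with ⟨hpa, hpw2⟩
  rcases List.pairwise_cons.mp hpw2 with ⟨hpb, _⟩
  have hkb_le : p2.1 ≤ p1.1 := hpa p2 (by simp)
  have hget0 : PySem.List.pyGetD (p1 :: p2 :: t) 0 ((0 : Int), (0 : Int)) = p1 := by
    rw [PySem.List.pyGetD_zero]; rfl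
  have hget1 : PySem.List.pyGetD (p1 :: p2 :: t) 1 ((0 : Int), (0 : Int)) = p2 := by
    rw [PySem.List.pyGetD_eq_getElem (p1 :: p2 :: t) (i := 1) ((0 : Int), (0 : Int))
      (by omega) (by simp)]
    rfl
  rw [max_cnt_eq m hne hnn, ← hM, anw_eq m hlen M, hget0, hget1]
  set fl := (List.range m.length).filter (fun k => decide (m.getD k 0 = M)) with hfl
  have hflnodup : fl.Nodup := (List.nodup_range).filter _
  have hj1_fl : j1 ∈ fl := by
    rw [hfl, List.mem_filter]
    refine ⟨List.mem_range.mpr (by omega), ?_⟩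
    simp only [decide_eq_true_eq]
    rw [show m.getD j1 0 = p1.1 by rw [hj1]]
    exact hka
  by_cases htie : p2.1 = M
  · -- tie: two distinct argmax indices, both sides return -1
    have hj2_fl : j2 ∈ fl := by
      rw [hfl, List.mem_filter]
      refine ⟨List.mem_range.mpr (by omega), ?_⟩
      simp only [decide_eq_true_eq]
      rw [show m.getD j2 0 = p2.1 by rw [hj2]]
      exact htie
    have hjane : j1 ≠ j2 := by
      intro h
      exact hp12 (by rw [hj1, hj2, h])
    have h2 : 2 ≤ fl.length := two_le_length_of_ne hj1_fl hj2_fl hjane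
    rw [if_neg (by rw [List.length_map]; omega), if_neg (by omega)]
  · -- unique argmax: fl = [j1], B's strict comparison succeeds
    have hkb_lt : p2.1 < M := lt_of_le_of_ne (hka ▸ hkb_le) htie
    have hfl_sub : ∀ k ∈ fl, k = j1 := by
      intro k hk
      rw [hfl, List.mem_filter] at hk
      obtain ⟨hkr, hkv⟩ := hk
      by_contra hne'
      have hkP : (m.getD k 0, (k : Int)) ∈ P := hPmem' k (by rw [hlen] at hkr; exact List.mem_range.mp hkr)
      have hko : (m.getD k 0, (k : Int)) ∈ o := operm.mem_iff.mpr hkP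
      have hkna : (m.getD k 0, (k : Int)) ≠ p1 := by
        rw [hj1]
        intro h
        have hsnd := congrArg Prod.snd h
        simp only [] at hsnd
        exact hne' (by exact_mod_cast hsnd)
      have hkkey : m.getD k 0 = M := by simpa using hkv
      rw [ho, List.mem_cons] at hko
      rcases hko with h | hko
      · exact hkna h
      have hle2 : (m.getD k 0, (k : Int)).1 ≤ p2.1 := by
        rw [List.mem_cons] at hko
        rcases hko with h | hko
        · rw [h]
        · exact hpb _ hko
      simp only [] at hle2
      omega
    have hfl_eq : fl = [j1] := by
      rcases hfl2 : fl with _ | ⟨x, t2⟩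
      · rw [hfl2] at hj1_fl; cases hj1_fl
      · have hx : x = j1 := hfl_sub x (by rw [hfl2]; simp)
        have ht2 : t2 = [] := by
          rcases ht3 : t2 with _ | ⟨y, t3⟩
          · rfl
          · exfalso
            have hy : y = j1 := hfl_sub y (by rw [hfl2, ht3]; simp)
            have hnd := hflnodup
            rw [hfl2, ht3, hx, hy, List.nodup_cons] at hnd
            exact hnd.1 (by simp)
        rw [hx, ht2]
    rw [hfl_eq]
    rw [if_pos (by simp), if_pos (by omega)]
    rw [PySem.List.pyGetD_zero]
    simp [hj1]

-- ===== VERDICT (by name: the statement is the Claim_ definition above) =====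
-- ===== VERDICT (by name: the statement is the Claim_ definition above) =====
theorem solution_spec : Claim_equal_solution := by
  unfold Claim_equal_solution
  intro array _ _
  unfold Spec_solution solution solution_alt
  simp only []
  have hcnt : (PySem.List.pyRange 0 ((array.length : Int)) 1).foldl
      (fun m i => PySem.List.pySetD m (PySem.List.pyGetD array i 0)
        (PySem.List.pyGetD m (PySem.List.pyGetD array i 0) 0 + 1)) (List.replicate 1001 0)
      = cnt array := by
    rw [PySem.List.foldl_pyRange_zero_pyGetD' array 0
      (fun m v => PySem.List.pySetD m v (PySem.List.pyGetD m v 0 + 1)) (List.replicate 1001 0)]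
    rfl
  rw [hcnt]
  have hlen : (cnt array).length = 1001 := by
    show (array.foldl cstep (List.replicate 1001 0)).length = 1001
    rw [length_cnt_foldl, List.length_replicate]
  have hnn : ∀ x ∈ cnt array, 0 ≤ x :=
    nonneg_cnt_foldl array _ (fun x hx => by rw [List.eq_of_mem_replicate hx])
  exact post_eq (cnt array) hlen hnn
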